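-- pv_equiv track=rewrite | github.com/Camsbury/foobar | string_cleaning.py | shortify
-- ===== SOURCE A (Python) =====
-- def shortify(solutions):
--     min_length = 21
--     new_sols = []
--     for sol in solutions:
--         if len(sol) < min_length:
--             new_sols = [sol]
--             min_length = len(sol)
--         elif len(sol) == min_length:
--             new_sols.append(sol)
--     return new_sols
-- ===== SOURCE B (Python) =====
-- def shortify(solutions):
--     m = min([21] + [len(s) for s in solutions])
--     return [s for s in solutions if len(s) == m]
-- ===== Notes on version B (the rewrite author's own statement) =====
-- stated objective: simpler
-- what changed: Replaces A's single adaptive pass (reset list on shorter, append on equal) with a compute-minimum-then-filter two-pass structure: minimum of lengths seeded with the cap 21, then a list comprehension keeping strings of that length.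
import Mathlib
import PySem

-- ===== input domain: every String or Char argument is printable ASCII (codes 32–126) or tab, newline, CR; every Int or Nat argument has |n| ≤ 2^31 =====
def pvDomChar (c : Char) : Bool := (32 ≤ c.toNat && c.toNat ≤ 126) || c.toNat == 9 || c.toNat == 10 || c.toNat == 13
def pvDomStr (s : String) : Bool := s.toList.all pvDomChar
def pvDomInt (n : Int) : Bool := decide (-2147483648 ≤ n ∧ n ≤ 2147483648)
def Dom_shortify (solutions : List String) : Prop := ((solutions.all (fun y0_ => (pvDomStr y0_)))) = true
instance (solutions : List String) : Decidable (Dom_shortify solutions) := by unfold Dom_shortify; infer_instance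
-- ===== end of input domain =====

-- B replaces A's single adaptive pass (reset-on-shorter, append-on-equal) with a
-- simpler two-pass compute-minimum-then-filter structure; same O(n) cost.


-- ===== PORT A =====
def shortify (solutions : List String) : List String :=
  (solutions.foldl (fun (st : Int × List String) sol =>
      if PySem.Str.len sol < st.1 then (PySem.Str.len sol, [sol])
      else if PySem.Str.len sol = st.1 then (st.1, st.2 ++ [sol])
      else st)
    ((21 : Int), ([] : List String))).2

-- ===== PORT B =====
def shortify_alt (solutions : List String) : List String :=
  let m := (solutions.map PySem.Str.len).foldl min (21 : Int)
  solutions.filter (fun s => PySem.Str.len s == m)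

-- ===== PRECONDITION & SPEC =====
def Spec_shortify (solutions : List String) (out : List String) : Prop := out = shortify_alt solutions
instance (solutions : List String) (out : List String) : Decidable (Spec_shortify solutions out) := by unfold Spec_shortify; infer_instance

-- ===== CLAIM (what is proved, stated in full; the proofs are below) =====
def Claim_equal_shortify : Prop := ∀ (solutions : List String), Dom_shortify solutions → Spec_shortify solutions (shortify solutions)

-- ===== LEMMAS AND PROOFS =====

-- the running minimum of lengths, as B computes it (seeded with an arbitrary start m)
def pvMinLen (m : Int) (l : List String) : Int := (l.map PySem.Str.len).foldl min m

lemma pvMinLen_le (l : List String) (m : Int) : pvMinLen m l ≤ m := by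
  induction l generalizing m with
  | nil => simp [pvMinLen]
  | cons s t ih =>
      have h := ih (min m (PySem.Str.len s))
      simp only [pvMinLen, List.map_cons, List.foldl_cons] at *
      exact le_trans h (min_le_left _ _)

lemma pvMinLen_cons (m : Int) (s : String) (t : List String) :
    pvMinLen m (s :: t) = pvMinLen (min m (PySem.Str.len s)) t := by
  simp [pvMinLen]

-- invariant of A's loop: from state (m, acc) the fold returns the final minimum and
-- acc (kept iff the minimum never dropped below m) followed by the strings of minimal length
lemma foldA_eq (l : List String) (m : Int) (acc : List String) :
    l.foldl (fun (st : Int × List String) sol =>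
        if PySem.Str.len sol < st.1 then (PySem.Str.len sol, [sol])
        else if PySem.Str.len sol = st.1 then (st.1, st.2 ++ [sol])
        else st) (m, acc)
      = (pvMinLen m l,
         (if pvMinLen m l = m then acc else []) ++
           l.filter (fun s => PySem.Str.len s == pvMinLen m l)) := by
  induction l generalizing m acc with
  | nil => simp [pvMinLen]
  | cons s t ih =>
      rw [List.foldl_cons]
      by_cases h1 : PySem.Str.len s < m
      · rw [if_pos h1, ih, pvMinLen_cons, min_eq_right (le_of_lt h1)]
        have hle2 : pvMinLen (PySem.Str.len s) t ≤ PySem.Str.len s := pvMinLen_le _ _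
        have hne : ¬ pvMinLen (PySem.Str.len s) t = m := by omega
        rw [if_neg hne, List.filter_cons]
        by_cases h2 : pvMinLen (PySem.Str.len s) t = PySem.Str.len s
        · rw [if_pos h2]
          have hb : (PySem.Str.len s == pvMinLen (PySem.Str.len s) t) = true :=
            beq_iff_eq.mpr h2.symm
          rw [if_pos hb]
          simp
        · rw [if_neg h2]
          have hb : ¬ (PySem.Str.len s == pvMinLen (PySem.Str.len s) t) = true := by
            simp only [beq_iff_eq]; omega
          rw [if_neg hb]
      · rw [if_neg h1]
        have hm : min m (PySem.Str.len s) = m := min_eq_left (by omega)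
        have hle2 : pvMinLen m t ≤ m := pvMinLen_le _ _
        by_cases h2 : PySem.Str.len s = m
        · rw [if_pos h2, ih, pvMinLen_cons, hm, List.filter_cons]
          by_cases h3 : pvMinLen m t = m
          · rw [if_pos h3, if_pos h3]
            have hb : (PySem.Str.len s == pvMinLen m t) = true := beq_iff_eq.mpr (by omega)
            rw [if_pos hb]
            simp
          · rw [if_neg h3, if_neg h3]
            have hb : ¬ (PySem.Str.len s == pvMinLen m t) = true := by
              simp only [beq_iff_eq]; omega
            rw [if_neg hb]
        · rw [if_neg h2, ih, pvMinLen_cons, hm, List.filter_cons]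
          have hb : ¬ (PySem.Str.len s == pvMinLen m t) = true := by
            simp only [beq_iff_eq]; omega
          rw [if_neg hb]

-- ===== VERDICT (by name: the statement is the Claim_ definition above) =====
theorem shortify_spec : Claim_equal_shortify := by
  intro solutions _
  unfold Spec_shortify shortify shortify_alt
  rw [foldA_eq]
  simp only [ite_self, List.nil_append, pvMinLen]
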